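-- pv_equiv track=rewrite | github.com/pbert5/lysozyme-stain-quantification | src/manual_verification_tool/visual_inspector.py | _sanitize_subject_name
-- ===== SOURCE A (Python) =====
-- def _sanitize_subject_name(subject_name):
--     """Normalize subject names to match rendered image file prefixes."""
--     s = subject_name.strip()
--     s = s.replace(' - ', '_-_')
--     s = s.replace(' ', '_')
--     s = s.replace('/', '_')
--     for ch in '[]+':
--         s = s.replace(ch, '')
--     while '__' in s:
--         s = s.replace('__', '_')
--     return s
-- ===== SOURCE B (Python) =====
-- def _sanitize_subject_name(subject_name):
--     """Normalize subject names to match rendered image file prefixes."""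
--     out = []
--     for c in subject_name.strip():
--         if c in '[]+':
--             continue
--         if c in ' /':
--             c = '_'
--         if c == '_' and out and out[-1] == '_':
--             continue
--         out.append(c)
--     return ''.join(out)
-- ===== Notes on version B (the rewrite author's own statement) =====
-- stated objective: simpler
-- what changed: Replaces A's six whole-string rewriting passes (three str.replace calls, a character-deletion loop, and a repeated double-underscore-collapsing while-loop) by a single left-to-right pass over the stripped string that skips the bracket/plus characters, maps space and slash to underscore, and suppresses an underscore whenever the last emitted character is already one.
import Mathlib
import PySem

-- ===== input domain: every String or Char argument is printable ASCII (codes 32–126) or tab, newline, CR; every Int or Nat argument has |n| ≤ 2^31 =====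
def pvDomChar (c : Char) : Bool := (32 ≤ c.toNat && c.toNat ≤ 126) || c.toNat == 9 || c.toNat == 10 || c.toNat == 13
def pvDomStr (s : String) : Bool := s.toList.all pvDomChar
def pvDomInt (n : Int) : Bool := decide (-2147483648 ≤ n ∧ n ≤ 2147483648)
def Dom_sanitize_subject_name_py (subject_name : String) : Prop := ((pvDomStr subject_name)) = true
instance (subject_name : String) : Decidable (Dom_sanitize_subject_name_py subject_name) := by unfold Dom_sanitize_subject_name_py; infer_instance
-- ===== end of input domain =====

-- B replaces A's six whole-string rewriting passes by one left-to-right pass (objective: simpler); same return value on every input.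

-- ===== PORT A =====
-- helpers for the termination of A's `while '__' in s` loop (cited by `decreasing_by` below):
-- unfolding equations of PySem.Chars.replace.go, a length bound, and strict decrease when '__' occurs.
theorem go_zero (old new l acc : List Char) :
    PySem.Chars.replace.go old new 0 l acc = acc.reverse ++ l := by
  rw [PySem.Chars.replace.go]

theorem go_nil (old new : List Char) (fuel : Nat) (acc : List Char) :
    PySem.Chars.replace.go old new (fuel+1) [] acc = acc.reverse := by
  rw [PySem.Chars.replace.go]; simp

theorem go_cons (old new : List Char) (fuel : Nat) (c : Char) (t acc : List Char) :
    PySem.Chars.replace.go old new (fuel+1) (c::t) acc =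
      if old.isPrefixOf (c::t) then PySem.Chars.replace.go old new fuel (List.drop old.length (c::t)) (new.reverse ++ acc)
      else PySem.Chars.replace.go old new fuel t (c :: acc) := by
  rw [PySem.Chars.replace.go]

-- single-char replace is a flatMap

theorem go_dd_len_le (fuel : Nat) :
    ∀ (l acc : List Char),
      (PySem.Chars.replace.go ['_','_'] ['_'] fuel l acc).length ≤ acc.length + l.length := by
  induction fuel with
  | zero => intro l acc; rw [go_zero]; simp
  | succ n ih =>
    intro l acc
    cases l with
    | nil => rw [go_nil]; simp
    | cons c t =>
      rw [go_cons]
      split_ifs with hp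
      · obtain ⟨r, hr⟩ := List.isPrefixOf_iff_prefix.mp hp
        have hdrop : List.drop ['_','_'].length (c::t) = r := by rw [← hr]; simp
        rw [hdrop]
        have := ih r (['_'].reverse ++ acc)
        have hlen : t.length = r.length + 1 := by
          have h2 := congrArg List.length hr; simp at h2; omega
        simp at this ⊢
        omega
      · have := ih t (c :: acc)
        simp at this ⊢
        omega

theorem go_dd_len_lt (fuel : Nat) :
    ∀ (l acc : List Char), l.length ≤ fuel → (['_','_'] <:+: l) →
      (PySem.Chars.replace.go ['_','_'] ['_'] fuel l acc).length < acc.length + l.length := by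
  induction fuel with
  | zero =>
    intro l acc h hinf
    obtain ⟨x, y, hxy⟩ := hinf
    have : l.length ≥ 2 := by rw [← hxy]; simp; omega
    omega
  | succ n ih =>
    intro l acc h hinf
    cases l with
    | nil => simp at hinf
    | cons c t =>
      rw [go_cons]
      split_ifs with hp
      · obtain ⟨r, hr⟩ := List.isPrefixOf_iff_prefix.mp hp
        have hdrop : List.drop ['_','_'].length (c::t) = r := by rw [← hr]; simp
        rw [hdrop]
        have := go_dd_len_le n r (['_'].reverse ++ acc)
        have hlen : t.length = r.length + 1 := by
          have h2 := congrArg List.length hr; simp at h2; omega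
        simp at this ⊢
        omega
      · rcases List.infix_cons_iff.mp hinf with hpre | hsuf
        · exact absurd (List.isPrefixOf_iff_prefix.mpr hpre) hp
        · have := ih t (c :: acc) (by simp at h; omega) hsuf
          simp at this ⊢
          omega

theorem pvReplaceDD_len_lt (s : List Char) (h : PySem.Chars.isIn ['_', '_'] s = true) :
    (PySem.Chars.replace s ['_', '_'] ['_']).length < s.length := by
  have hinf := (PySem.Chars.isIn_iff_infix _ _).mp h
  rw [PySem.Chars.replace]
  simp only [List.isEmpty_cons, Bool.false_eq_true, if_false]
  have := go_dd_len_lt s.length s [] (le_refl _) hinf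
  simpa using this

def collapseLoopA (s : List Char) : List Char :=
  if h : PySem.Chars.isIn ['_', '_'] s = true then
    collapseLoopA (PySem.Chars.replace s ['_', '_'] ['_'])
  else s
termination_by s.length
decreasing_by exact pvReplaceDD_len_lt s h

def sanitize_subject_name_py (subject_name : String) : String :=
  let s := PySem.Chars.strip subject_name.toList
  let s := PySem.Chars.replace s [' ', '-', ' '] ['_', '-', '_']
  let s := PySem.Chars.replace s [' '] ['_']
  let s := PySem.Chars.replace s ['/'] ['_']
  let s := "[]+".toList.foldl (fun s ch => PySem.Chars.replace s [ch] []) s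
  String.ofList (collapseLoopA s)

-- ===== PORT B =====
-- `c = '_' if c in ' /' else c` of Source B, as a helper
def sigma (c : Char) : Char := if [' ', '/'].contains c then '_' else c

-- body of B's single for-loop: skip '[]+', map ' ' and '/' to '_', suppress a duplicated '_'
def altStep (acc : List Char) (c : Char) : List Char :=
  if ['[', ']', '+'].contains c then acc
  else
    let c2 := sigma c
    if c2 == '_' && acc.getLast? == some '_' then acc
    else acc ++ [c2]

def sanitize_subject_name_py_alt (subject_name : String) : String :=
  String.ofList ((PySem.Chars.strip subject_name.toList).foldl altStep [])

-- ===== PRECONDITION & SPEC =====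
def Spec_sanitize_subject_name_py (subject_name : String) (out : String) : Prop := out = sanitize_subject_name_py_alt subject_name
instance (subject_name : String) (out : String) : Decidable (Spec_sanitize_subject_name_py subject_name out) := by unfold Spec_sanitize_subject_name_py; infer_instance

-- ===== CLAIM (what is proved, stated in full; the proofs are below) =====
def Claim_equal_sanitize_subject_name_py : Prop := ∀ (subject_name : String), Dom_sanitize_subject_name_py subject_name → Spec_sanitize_subject_name_py subject_name (sanitize_subject_name_py subject_name)

-- ===== LEMMAS AND PROOFS =====

def sqz (last : Option Char) : List Char → List Char
  | [] => []
  | c :: t => if c = '_' ∧ last = some '_' then sqz last t else c :: sqz (some c) t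

theorem sqz_nil (last : Option Char) : sqz last [] = [] := rfl

def keepB (c : Char) : Bool := !(['[', ']', '+'].contains c)

theorem go_single (a : Char) (w : List Char) (fuel : Nat) :
    ∀ (l acc : List Char), l.length ≤ fuel →
      PySem.Chars.replace.go [a] w fuel l acc
        = acc.reverse ++ l.flatMap (fun c => if c = a then w else [c]) := by
  induction fuel with
  | zero => intro l acc h; simp at h; subst h; simp [go_zero]
  | succ n ih =>
    intro l acc h
    cases l with
    | nil => simp [go_nil]
    | cons c t =>
      rw [go_cons]
      by_cases hc : c = a
      · subst hc
        have : List.isPrefixOf [c] (c::t) = true := by simp [List.isPrefixOf]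
        rw [if_pos this]
        simp only [List.length_singleton, List.drop_succ_cons, List.drop_zero]
        rw [ih t _ (by simp at h; omega)]
        simp
      · have : List.isPrefixOf [a] (c::t) = false := by
          simp [List.isPrefixOf]; exact fun h => absurd h.symm hc
        rw [if_neg (by simp [this])]
        simp only [List.length_cons] at h
        rw [ih t _ (by omega)]
        simp [hc]

theorem replace_single (s : List Char) (a : Char) (w : List Char) :
    PySem.Chars.replace s [a] w = s.flatMap (fun c => if c = a then w else [c]) := by
  rw [PySem.Chars.replace]
  simp only [List.isEmpty_cons, Bool.false_eq_true, if_false]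
  exact go_single a w s.length s [] (le_refl _)

theorem replace_single_char (s : List Char) (a b : Char) :
    PySem.Chars.replace s [a] [b] = s.map (fun c => if c = a then b else c) := by
  rw [replace_single]
  induction s with
  | nil => rfl
  | cons c t ih => by_cases h : c = a <;> simp [h, ih]

theorem replace_del (s : List Char) (a : Char) :
    PySem.Chars.replace s [a] [] = s.filter (fun c => !(c == a)) := by
  rw [replace_single]
  induction s with
  | nil => rfl
  | cons c t ih => by_cases h : c = a <;> simp [h, ih]

def mapSp (s : List Char) : List Char := s.map (fun c => if c = ' ' then '_' else c)

-- the ' - ' -> '_-_' pass is invisible after spaces are mapped to underscores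

theorem go_dash (fuel : Nat) :
    ∀ (l acc : List Char),
      mapSp (PySem.Chars.replace.go [' ','-',' '] ['_','-','_'] fuel l acc)
        = mapSp acc.reverse ++ mapSp l := by
  induction fuel with
  | zero => intro l acc; simp [go_zero, mapSp]
  | succ n ih =>
    intro l acc
    cases l with
    | nil => simp [go_nil, mapSp]
    | cons c t =>
      rw [go_cons]
      split_ifs with hp
      · obtain ⟨r, hr⟩ := List.isPrefixOf_iff_prefix.mp hp
        rw [ih]
        have hdrop : List.drop [' ','-',' '].length (c::t) = r := by
          rw [← hr]; simp
        rw [hdrop]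
        have hct : (c::t) = ' '::'-'::' '::r := by rw [← hr]; rfl
        rw [hct]
        simp [mapSp]
      · rw [ih]
        simp [mapSp]

theorem replace_dash (s : List Char) :
    mapSp (PySem.Chars.replace s [' ','-',' '] ['_','-','_']) = mapSp s := by
  rw [PySem.Chars.replace]
  simp only [List.isEmpty_cons, Bool.false_eq_true, if_false]
  rw [go_dash]; simp [mapSp]

theorem sqz_dd (last : Option Char) (x r : List Char) :
    sqz last (x ++ '_'::'_'::r) = sqz last (x ++ '_'::r) := by
  induction x generalizing last with
  | nil =>
    by_cases h : last = some '_'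
    · simp [sqz, h]
    · simp [sqz, h]
  | cons a x ih =>
    by_cases h : a = '_' ∧ last = some '_'
    · simp [sqz, h, ih]
    · simp [sqz, h, ih]

theorem go_dd (fuel : Nat) :
    ∀ (l acc : List Char),
      sqz none (PySem.Chars.replace.go ['_','_'] ['_'] fuel l acc)
        = sqz none (acc.reverse ++ l) := by
  induction fuel with
  | zero => intro l acc; rw [go_zero]
  | succ n ih =>
    intro l acc
    cases l with
    | nil => rw [go_nil]; simp
    | cons c t =>
      rw [go_cons]
      split_ifs with hp
      · obtain ⟨r, hr⟩ := List.isPrefixOf_iff_prefix.mp hp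
        rw [ih]
        have hdrop : List.drop ['_','_'].length (c::t) = r := by rw [← hr]; simp
        rw [hdrop]
        have hct : (c::t) = '_'::'_'::r := by rw [← hr]; rfl
        rw [hct, sqz_dd none acc.reverse r]
        simp
      · rw [ih]; simp

theorem replace_dd (s : List Char) :
    sqz none (PySem.Chars.replace s ['_','_'] ['_']) = sqz none s := by
  rw [PySem.Chars.replace]
  simp only [List.isEmpty_cons, Bool.false_eq_true, if_false]
  rw [go_dd]; simp

theorem sqz_of_no_dd (u : List Char) :
    ∀ last, ¬ (['_','_'] <:+: u) → (last = some '_' → u.head? ≠ some '_') →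
      sqz last u = u := by
  induction u with
  | nil => intro last _ _; rfl
  | cons c t ih =>
    intro last hinf hhead
    have hnc : ¬ (c = '_' ∧ last = some '_') := by
      rintro ⟨hc, hl⟩
      exact (hhead hl) (by simp [hc])
    rw [sqz, if_neg hnc]
    congr 1
    apply ih
    · intro h; exact hinf (h.trans (List.suffix_cons c t).isInfix)
    · intro hc
      simp at hc
      intro hh
      apply hinf
      cases t with
      | nil => simp at hh
      | cons d t' =>
        simp at hh
        rw [hc, hh]
        exact ⟨[], t', by simp⟩

theorem collapse_eq_sqz (s : List Char) : collapseLoopA s = sqz none s := by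
  rw [collapseLoopA]
  split_ifs with h
  · rw [collapse_eq_sqz, replace_dd]
  · exact (sqz_of_no_dd s none (by
      intro hinf
      exact h ((PySem.Chars.isIn_iff_infix _ _).mpr hinf)) (by simp)).symm
termination_by s.length
decreasing_by exact pvReplaceDD_len_lt s h

theorem foldB (l : List Char) :
    ∀ acc, l.foldl altStep acc = acc ++ sqz acc.getLast? ((l.filter keepB).map sigma) := by
  induction l with
  | nil => intro acc; simp [sqz_nil]
  | cons c t ih =>
    intro acc
    simp only [List.foldl_cons]
    by_cases hk : ['[', ']', '+'].contains c = true
    · rw [show altStep acc c = acc from by unfold altStep; rw [if_pos hk]]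
      rw [ih]
      have hkf : keepB c = false := by unfold keepB; rw [hk]; rfl
      rw [List.filter_cons_of_neg (by rw [hkf]; exact Bool.false_ne_true)]
    · have hkeep : keepB c = true := by
        unfold keepB; rw [Bool.eq_false_iff.mpr hk]; rfl
      by_cases hdup : sigma c = '_' ∧ acc.getLast? = some '_'
      · rw [show altStep acc c = acc from by
          unfold altStep; rw [if_neg hk]
          show (if sigma c == '_' && acc.getLast? == some '_' then acc else acc ++ [sigma c]) = acc
          rw [if_pos (by simp [hdup.1, hdup.2])]]
        rw [ih]
        rw [List.filter_cons_of_pos hkeep, List.map_cons]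
        rw [sqz, if_pos ⟨hdup.1, hdup.2⟩]
      · rw [show altStep acc c = acc ++ [sigma c] from by
          unfold altStep; rw [if_neg hk]
          show (if sigma c == '_' && acc.getLast? == some '_' then acc else acc ++ [sigma c]) = acc ++ [sigma c]
          rw [if_neg (by simpa using hdup)]]
        rw [ih]
        rw [List.filter_cons_of_pos hkeep, List.map_cons]
        rw [sqz, if_neg hdup]
        rw [List.getLast?_concat, List.append_assoc]
        rfl

theorem main_chars (t : List Char) :
    collapseLoopA
      ("[]+".toList.foldl (fun s ch => PySem.Chars.replace s [ch] [])
        (PySem.Chars.replace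
          (PySem.Chars.replace
            (PySem.Chars.replace t [' ', '-', ' '] ['_', '-', '_'])
            [' '] ['_'])
          ['/'] ['_']))
      = t.foldl altStep [] := by
  have htl : "[]+".toList = ['[', ']', '+'] := by rfl
  rw [htl]
  simp only [List.foldl_cons, List.foldl_nil]
  rw [replace_single_char _ ' ' '_', replace_single_char _ '/' '_',
      replace_del, replace_del, replace_del]
  -- collapse the two maps into map sigma, using replace_dash
  have hmap : (PySem.Chars.replace t [' ', '-', ' '] ['_', '-', '_']).map (fun c => if c = ' ' then '_' else c) = mapSp t := replace_dash t
  rw [hmap]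
  have hms : (mapSp t).map (fun c => if c = '/' then '_' else c) = t.map sigma := by
    unfold mapSp
    rw [List.map_map]
    apply List.map_congr_left
    intro c _
    by_cases h1 : c = ' ' <;> by_cases h2 : c = '/' <;>
      simp [sigma, h1, h2]
  rw [hms]
  -- fold the three filters into one filter keepB, commuted before the map
  have hfil : ((((t.map sigma).filter (fun c => !(c == '['))).filter (fun c => !(c == ']'))).filter (fun c => !(c == '+')))
      = (t.map sigma).filter keepB := by
    rw [List.filter_filter, List.filter_filter]
    apply List.filter_congr
    intro c _
    by_cases h1 : c = '[' <;> by_cases h2 : c = ']' <;> by_cases h3 : c = '+' <;>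
      simp [keepB, h1, h2, h3]
  rw [hfil]
  have hcomm : (t.map sigma).filter keepB = (t.filter keepB).map sigma := by
    rw [List.filter_map]
    congr 1
    apply List.filter_congr
    intro c _
    by_cases h1 : c = ' ' <;> by_cases h2 : c = '/' <;>
      simp [Function.comp, keepB, sigma, h1, h2]
  rw [hcomm, collapse_eq_sqz, foldB]
  rfl

-- ===== VERDICT (by name: the statement is the Claim_ definition above) =====
theorem sanitize_subject_name_py_spec : Claim_equal_sanitize_subject_name_py := by
  intro s _
  unfold Spec_sanitize_subject_name_py sanitize_subject_name_py sanitize_subject_name_py_alt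
  exact congrArg String.ofList (main_chars (PySem.Chars.strip s.toList))
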